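-- pv_equiv track=rewrite | github.com/dickensxie/listed-company-analysis | scripts/annual_extract.py | _merge_span_rows
-- ===== SOURCE A (Python) =====
-- def _merge_span_rows(data):
--     """合并跨列占位符行（-- 或空）"""
--     if not data:
--         return data
--     merged = [list(data[0])]
--     for row in data[1:]:
--         first = str(row[0]).strip() if row else ''
--         if len(first) < 3 or first in ('--', '-'):
--             for j, val in enumerate(row):
--                 if j < len(merged[-1]) and str(val).strip():
--                     merged[-1][j] = str(merged[-1][j]).strip() + ' ' + str(val).strip()
--                 elif str(val).strip():
--                     merged[-1].append(str(val).strip())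
--         else:
--             merged.append(list(row))
--     return merged
-- ===== SOURCE B (Python) =====
-- def _merge_span_rows(data):
--     """合并跨列占位符行（-- 或空）: two staged passes — partition into groups, then rebuild each merged row functionally."""
--     if not data:
--         return data
--     # pass 1: partition rows into groups; a row anchors a new group unless it is a
--     # span row (first cell, stripped, shorter than 3 chars or '--'/'-'); the very
--     # first row always anchors.
--     groups = []
--     for row in data:
--         first = str(row[0]).strip() if row else ''
--         if groups and (len(first) < 3 or first in ('--', '-')):
--             groups[-1].append(row)
--         else:
--             groups.append([row])
--     # pass 2: fold each group into one row; the per-row merge builds a fresh list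
--     # (comprehension over the accumulator zipped against the row, plus the row's
--     # stripped non-blank overflow cells) instead of mutating in place.
--     def combine(acc, row):
--         head = [str(acc[j]).strip() + ' ' + str(row[j]).strip()
--                 if j < len(row) and str(row[j]).strip() else acc[j]
--                 for j in range(len(acc))]
--         tail = [str(v).strip() for v in row[len(acc):] if str(v).strip()]
--         return head + tail
--     out = []
--     for g in groups:
--         acc = list(g[0])
--         for row in g[1:]:
--             acc = combine(acc, row)
--         out.append(acc)
--     return out
-- ===== Notes on version B (the rewrite author's own statement) =====
-- stated objective: alternative
-- what changed: A is one stateful pass that rewrites merged[-1] in place cell by cell via enumerate; B first partitions the rows into anchor-led groups, then folds each group with a functional combine that rebuilds the row as a comprehension over the accumulator plus the stripped non-blank overflow slice row[len(acc):] (no in-place mutation, no growing-length/append interplay).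
import Mathlib
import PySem

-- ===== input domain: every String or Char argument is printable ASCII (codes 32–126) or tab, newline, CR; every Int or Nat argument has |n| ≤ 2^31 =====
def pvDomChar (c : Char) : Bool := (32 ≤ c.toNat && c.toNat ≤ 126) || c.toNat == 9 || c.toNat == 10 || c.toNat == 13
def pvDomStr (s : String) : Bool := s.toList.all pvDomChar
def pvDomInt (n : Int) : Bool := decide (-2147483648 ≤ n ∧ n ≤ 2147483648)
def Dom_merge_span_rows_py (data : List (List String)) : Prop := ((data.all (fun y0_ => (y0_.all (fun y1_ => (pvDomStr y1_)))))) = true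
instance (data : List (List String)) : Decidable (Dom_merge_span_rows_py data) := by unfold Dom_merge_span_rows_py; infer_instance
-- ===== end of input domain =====

-- B replaces A's single stateful fold that mutates merged[-1] cell by cell with two staged
-- passes — partition the rows into anchor-led groups, then rebuild each merged row
-- functionally (comprehension over the accumulator plus the row's overflow slice) —
-- same value, alternative decomposition. (A does not mutate its argument: list(row) copies.)

-- ===== PORT A =====
-- first = str(row[0]).strip() if row else ''; len(first) < 3 or first in ('--','-')
def pvIsSpan (row : List String) : Bool :=
  let first := match row with | [] => "" | r0 :: _ => PySem.Str.strip r0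
  decide (PySem.Str.len first < 3) || first == "--" || first == "-"

-- body of A's inner 'for j, val in enumerate(row)' loop (jv = (j, val), acc = merged[-1])
def pvStep (acc : List String) (jv : Int × String) : List String :=
  if jv.1 < (acc.length : Int) ∧ PySem.Str.strip jv.2 ≠ "" then
    PySem.List.pySetD acc jv.1
      (PySem.Str.strip (PySem.List.pyGetD acc jv.1 "") ++ " " ++ PySem.Str.strip jv.2)
  else if PySem.Str.strip jv.2 ≠ "" then acc ++ [PySem.Str.strip jv.2]
  else acc

-- A's inner loop: mutate merged[-1] cell by cell
def pvMergeCells (acc0 row : List String) : List String :=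
  (PySem.List.enumerate row).foldl pvStep acc0

-- one iteration of A's 'for row in data[1:]' loop body
def pvStepA (merged : List (List String)) (row : List String) : List (List String) :=
  if pvIsSpan row then merged.dropLast ++ [pvMergeCells (merged.getLastD []) row]
  else merged ++ [row]

def merge_span_rows_py (data : List (List String)) : List (List String) :=
  match data with
  | [] => []
  | d0 :: rest => rest.foldl pvStepA [d0]

-- ===== PORT B =====
-- B's combine(acc, row): comprehension over range(len(acc)), plus the stripped
-- non-blank overflow cells of row[len(acc):]
def pvCombine (acc row : List String) : List String :=
  ((List.range acc.length).map (fun j =>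
      if j < row.length ∧ PySem.Str.strip (row.getD j "") ≠ "" then
        PySem.Str.strip (acc.getD j "") ++ " " ++ PySem.Str.strip (row.getD j "")
      else acc.getD j ""))
  ++ (((PySem.List.slice row (some (acc.length : Int)) none).filter
        (fun v => PySem.Str.strip v ≠ "")).map PySem.Str.strip)

-- B's pass-1 loop body: append a span row to the current group, else open a new group
-- (the very first row always opens a group, since groups is empty then)
def pvStepB (groups : List (List (List String))) (row : List String) : List (List (List String)) :=
  if groups ≠ [] ∧ pvIsSpan row then groups.dropLast ++ [groups.getLastD [] ++ [row]]
  else groups ++ [[row]]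

-- B's pass-2 inner loop: acc = list(g[0]); then fold combine over the group's span rows
def pvFoldGroup (g : List (List String)) : List String :=
  match g with
  | [] => []
  | a :: rs => rs.foldl pvCombine a

def merge_span_rows_py_alt (data : List (List String)) : List (List String) :=
  match data with
  | [] => []
  | _ :: _ => (data.foldl pvStepB []).map pvFoldGroup

-- ===== PRECONDITION & SPEC =====
def Spec_merge_span_rows_py (data : List (List String)) (out : List (List String)) : Prop := out = merge_span_rows_py_alt data
instance (data : List (List String)) (out : List (List String)) : Decidable (Spec_merge_span_rows_py data out) := by unfold Spec_merge_span_rows_py; infer_instance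

-- ===== CLAIM (what is proved, stated in full; the proofs are below) =====
def Claim_equal_merge_span_rows_py : Prop := ∀ (data : List (List String)), Dom_merge_span_rows_py data → Spec_merge_span_rows_py data (merge_span_rows_py data)

-- ===== LEMMAS AND PROOFS =====

theorem getD_range_map (acc : List String) (d : String) :
    (List.range acc.length).map (fun j => acc.getD j d) = acc := by
  induction acc with
  | nil => simp
  | cons a as ih =>
    simp [List.range_succ_eq_map]
    exact ih

theorem pvCombine_nil_right (acc : List String) : pvCombine acc [] = acc := by
  simp [pvCombine, PySem.List.slice_from_natCast]
  exact getD_range_map acc ""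

theorem pvCombine_nil_left (row : List String) :
    pvCombine [] row = (row.filter (fun v => PySem.Str.strip v ≠ "")).map PySem.Str.strip := by
  simp [pvCombine]

theorem pvCombine_cons (a v : String) (as vs : List String) :
    pvCombine (a :: as) (v :: vs) =
      (if PySem.Str.strip v ≠ "" then PySem.Str.strip a ++ " " ++ PySem.Str.strip v else a)
        :: pvCombine as vs := by
  have hs : (PySem.List.slice (v :: vs) (some ((as.length + 1 : Nat) : Int)) none)
      = PySem.List.slice vs (some ((as.length : Nat) : Int)) none := by
    rw [show ((as.length + 1 : Nat) : Int) = (((as.length + 1 : Nat)) : Int) from rfl]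
    rw [PySem.List.slice_from_natCast, PySem.List.slice_from_natCast]
    simp
  simp only [pvCombine, List.length_cons, List.range_succ_eq_map, List.map_cons, List.map_map, hs]
  simp [Function.comp]

-- once the running index has reached the accumulator's length, A's inner loop only appends
theorem pvMerge_loop_append (row : List String) :
    ∀ (acc : List String) (k : Int), (acc.length : Int) ≤ k →
      ((PySem.List.enumerate row k).foldl pvStep acc)
      = acc ++ (row.filter (fun v => PySem.Str.strip v ≠ "")).map PySem.Str.strip := by
  induction row with
  | nil => intro acc k h; simp [PySem.List.enumerate]
  | cons v vs ih =>
    intro acc k h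
    rw [PySem.List.enumerate_cons]
    by_cases hb : PySem.Str.strip v = ""
    · have hstep : pvStep acc (k, v) = acc := by simp [pvStep, hb]
      simp only [List.foldl_cons, hstep]
      rw [ih acc (k+1) (by omega)]
      simp [hb]
    · have hstep : pvStep acc (k, v) = acc ++ [PySem.Str.strip v] := by
        have : ¬ (k < (acc.length : Int)) := by omega
        simp [pvStep, hb, this]
      simp only [List.foldl_cons, hstep]
      rw [ih (acc ++ [PySem.Str.strip v]) (k+1) (by simp; omega)]
      simp [hb]

-- A's inner loop on state done ++ todo, with the index at done.length, leaves done
-- intact and computes B's combine of todo against the row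
theorem pvMerge_loop_main (row : List String) :
    ∀ (done todo : List String),
      (PySem.List.enumerate row (done.length : Int)).foldl pvStep (done ++ todo)
      = done ++ pvCombine todo row := by
  induction row with
  | nil => intro done todo; simp [PySem.List.enumerate, pvCombine_nil_right]
  | cons v vs ih =>
    intro done todo
    match todo with
    | [] =>
      rw [pvMerge_loop_append (v :: vs) (done ++ []) done.length (by simp)]
      simp [pvCombine_nil_left]
    | t :: ts =>
      rw [PySem.List.enumerate_cons, List.foldl_cons]
      by_cases hb : PySem.Str.strip v = ""
      · have hstep : pvStep (done ++ t :: ts) ((done.length : Int), v) = (done ++ [t]) ++ ts := by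
          simp [pvStep, hb]
        rw [hstep]
        have := ih (done ++ [t]) ts
        simp only [List.length_append, List.length_cons, List.length_nil] at this
        push_cast at this
        rw [this, pvCombine_cons]
        simp [hb]
      · have hget : PySem.List.pyGetD (done ++ t :: ts) (done.length : Int) "" = t := by
          simp [PySem.List.pyGetD_natCast, List.getD]
        have hset : PySem.List.pySetD (done ++ t :: ts) (done.length : Int)
            (PySem.Str.strip t ++ " " ++ PySem.Str.strip v)
            = (done ++ [PySem.Str.strip t ++ " " ++ PySem.Str.strip v]) ++ ts := by
          simp [PySem.List.pySetD_natCast]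
        have hstep : pvStep (done ++ t :: ts) ((done.length : Int), v)
            = (done ++ [PySem.Str.strip t ++ " " ++ PySem.Str.strip v]) ++ ts := by
          have hlt : (done.length : Int) < ((done ++ t :: ts).length : Int) := by
            simp only [List.length_append, List.length_cons]; push_cast; omega
          rw [pvStep, if_pos ⟨hlt, hb⟩, hget, hset]
        rw [hstep]
        have := ih (done ++ [PySem.Str.strip t ++ " " ++ PySem.Str.strip v]) ts
        simp only [List.length_append, List.length_cons, List.length_nil] at this
        push_cast at this
        rw [this, pvCombine_cons]
        simp [hb]

-- A's in-place cell loop computes exactly B's functional combine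
theorem pvMergeCells_eq_combine (acc row : List String) :
    pvMergeCells acc row = pvCombine acc row := by
  have := pvMerge_loop_main row [] acc
  simpa [pvMergeCells] using this

theorem pvFoldGroup_snoc (a : List String) (rs : List (List String)) (r : List String) :
    pvFoldGroup ((a :: rs) ++ [r]) = pvMergeCells (pvFoldGroup (a :: rs)) r := by
  simp [pvFoldGroup, pvMergeCells_eq_combine]

-- mapping the group fold over B's pass-1 state tracks A's merged list
theorem pvGroups_track (rows : List (List String)) :
    ∀ (gs : List (List (List String))) (g : List (List String)), g ≠ [] →
      (rows.foldl pvStepB (gs ++ [g])).map pvFoldGroup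
        = rows.foldl pvStepA ((gs ++ [g]).map pvFoldGroup) := by
  induction rows with
  | nil => intro gs g hg; rfl
  | cons r rs ih =>
    intro gs g hg
    obtain ⟨a, grest, rfl⟩ : ∃ a grest, g = a :: grest := by
      cases g with | nil => exact absurd rfl hg | cons a t => exact ⟨a, t, rfl⟩
    by_cases hs : pvIsSpan r = true
    · have hB : pvStepB (gs ++ [a :: grest]) r = gs ++ [(a :: grest) ++ [r]] := by
        simp [pvStepB, hs]
      have hA : pvStepA ((gs ++ [a :: grest]).map pvFoldGroup) r
          = (gs ++ [(a :: grest) ++ [r]]).map pvFoldGroup := by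
        simp [pvStepA, hs]
        exact (pvFoldGroup_snoc a grest r).symm
      simp only [List.foldl_cons, hB, hA]
      exact ih gs ((a :: grest) ++ [r]) (by simp)
    · have hB : pvStepB (gs ++ [a :: grest]) r = (gs ++ [a :: grest]) ++ [[r]] := by
        simp [pvStepB, hs]
      have hA : pvStepA ((gs ++ [a :: grest]).map pvFoldGroup) r
          = ((gs ++ [a :: grest]) ++ [[r]]).map pvFoldGroup := by
        simp [pvStepA, hs, pvFoldGroup]
      simp only [List.foldl_cons, hB, hA]
      have := ih (gs ++ [a :: grest]) [r] (by simp)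
      simpa using this

-- ===== VERDICT (by name: the statement is the Claim_ definition above) =====
theorem merge_span_rows_py_spec : Claim_equal_merge_span_rows_py := by
  intro data _
  unfold Spec_merge_span_rows_py
  match data with
  | [] => simp [merge_span_rows_py, merge_span_rows_py_alt]
  | d0 :: rest =>
    have h0 : pvStepB [] d0 = [[d0]] := by simp [pvStepB]
    have := pvGroups_track rest [] [d0] (by simp)
    simp only [merge_span_rows_py, merge_span_rows_py_alt, List.foldl_cons, h0]
    simpa [pvFoldGroup] using this.symm
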